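-- pv_equiv track=rewrite | github.com/ivanarasch/SourceSeparation | Evaluation/eval_demucs_exp2.py | find_original_folder
-- ===== SOURCE A (Python) =====
-- ORIGINAL_SUFFIX = "_original"  # still used if you have exact matches
--
-- def find_original_folder(versions, original_suffix=ORIGINAL_SUFFIX):
--     """
--     Given a list of subfolders, find the 'original' folder.
--     Priority:
--       1) folder that endswith original_suffix
--       2) folder whose name (lower) == 'original'
--       3) folder containing 'original' (case-insensitive)
--     Returns folder name or None.
--     """
--     for v in versions:
--         if v.endswith(original_suffix):
--             return v
--     for v in versions:
--         if v.lower() == 'original':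
--             return v
--     for v in versions:
--         if 'original' in v.lower():
--             return v
--     return None
-- ===== SOURCE B (Python) =====
-- ORIGINAL_SUFFIX = "_original"
--
-- def find_original_folder(versions, original_suffix=ORIGINAL_SUFFIX):
--     first_suffix = None
--     first_exact = None
--     first_contains = None
--     for v in versions:
--         if first_suffix is None and v.endswith(original_suffix):
--             first_suffix = v
--         if first_exact is None and v.lower() == 'original':
--             first_exact = v
--         if first_contains is None and 'original' in v.lower():
--             first_contains = v
--     if first_suffix is not None:
--         return first_suffix
--     if first_exact is not None:
--         return first_exact
--     return first_contains
-- ===== Notes on version B (the rewrite author's own statement) =====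
-- stated objective: alternative
-- what changed: Replaces A's three sequential scans over versions by a single pass that records the first match for each of the three priority predicates in three Option slots, then returns them in priority order.
import Mathlib
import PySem

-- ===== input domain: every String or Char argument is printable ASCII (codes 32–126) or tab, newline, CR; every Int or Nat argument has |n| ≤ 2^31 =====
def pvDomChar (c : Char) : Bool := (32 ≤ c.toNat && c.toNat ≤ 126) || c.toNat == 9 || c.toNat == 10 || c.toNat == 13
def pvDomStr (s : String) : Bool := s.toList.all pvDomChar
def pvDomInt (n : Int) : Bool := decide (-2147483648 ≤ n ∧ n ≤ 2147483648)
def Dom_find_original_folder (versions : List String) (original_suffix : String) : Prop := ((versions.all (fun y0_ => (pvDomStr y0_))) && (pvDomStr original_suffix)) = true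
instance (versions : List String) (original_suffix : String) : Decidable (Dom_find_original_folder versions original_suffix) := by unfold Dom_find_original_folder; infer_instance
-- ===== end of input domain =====

-- B replaces A's three sequential scans by one pass keeping the first match of each predicate
-- in three Option slots (objective: alternative decomposition, same cost).

-- ===== PORT A =====
-- 'for v in versions: if p(v): return v' transliterated as a structural recursion; A runs it three times.
def pvScanA (p : String → Bool) : List String → Option String
  | [] => none
  | v :: rest => if p v then some v else pvScanA p rest

def find_original_folder (versions : List String) (original_suffix : String) : Option String :=
  match pvScanA (fun v => PySem.Str.endswith v original_suffix) versions with
  | some v => some v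
  | none =>
    match pvScanA (fun v => PySem.Str.lower v == "original") versions with
    | some v => some v
    | none =>
      match pvScanA (fun v => PySem.Str.isIn "original" (PySem.Str.lower v)) versions with
      | some v => some v
      | none => none

-- ===== PORT B =====
def pvStepB (original_suffix : String)
    (acc : Option String × Option String × Option String) (v : String) :
    Option String × Option String × Option String :=
  let (fs, fe, fc) := acc
  ((if fs.isNone && PySem.Str.endswith v original_suffix then some v else fs),
   (if fe.isNone && (PySem.Str.lower v == "original") then some v else fe),
   (if fc.isNone && PySem.Str.isIn "original" (PySem.Str.lower v) then some v else fc))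

def find_original_folder_alt (versions : List String) (original_suffix : String) : Option String :=
  let (fs, fe, fc) := versions.foldl (pvStepB original_suffix) (none, none, none)
  if fs.isSome then fs
  else if fe.isSome then fe
  else fc

-- ===== PRECONDITION & SPEC =====
def Spec_find_original_folder (versions : List String) (original_suffix : String) (out : Option String) : Prop := out = find_original_folder_alt versions original_suffix
instance (versions : List String) (original_suffix : String) (out : Option String) : Decidable (Spec_find_original_folder versions original_suffix out) := by unfold Spec_find_original_folder; infer_instance

-- ===== CLAIM (what is proved, stated in full; the proofs are below) =====
def Claim_equal_find_original_folder : Prop := ∀ (versions : List String) (original_suffix : String), Dom_find_original_folder versions original_suffix → Spec_find_original_folder versions original_suffix (find_original_folder versions original_suffix)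

-- ===== LEMMAS AND PROOFS =====

-- B's one-pass fold computes, in each slot, the first element satisfying that slot's predicate.
theorem pvFoldl_stepB (original_suffix : String) (l : List String) :
    ∀ fs fe fc : Option String,
      l.foldl (pvStepB original_suffix) (fs, fe, fc) =
        (fs.orElse (fun _ => pvScanA (fun v => PySem.Str.endswith v original_suffix) l),
         fe.orElse (fun _ => pvScanA (fun v => PySem.Str.lower v == "original") l),
         fc.orElse (fun _ => pvScanA (fun v => PySem.Str.isIn "original" (PySem.Str.lower v)) l)) := by
  induction l with
  | nil => intro fs fe fc; cases fs <;> cases fe <;> cases fc <;> simp [pvScanA, Option.orElse]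
  | cons v t ih =>
    intro fs fe fc
    show t.foldl (pvStepB original_suffix) (pvStepB original_suffix (fs, fe, fc) v) = _
    simp only [pvStepB]
    rw [ih]
    cases fs <;> cases fe <;> cases fc <;>
      simp [pvScanA, Option.orElse] <;>
      split_ifs <;> simp_all [Option.orElse]

theorem find_original_folder_eq (versions : List String) (original_suffix : String) :
    find_original_folder versions original_suffix = find_original_folder_alt versions original_suffix := by
  unfold find_original_folder find_original_folder_alt
  rw [pvFoldl_stepB]
  cases h1 : pvScanA (fun v => PySem.Str.endswith v original_suffix) versions <;>
  cases h2 : pvScanA (fun v => PySem.Str.lower v == "original") versions <;>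
  cases h3 : pvScanA (fun v => PySem.Str.isIn "original" (PySem.Str.lower v)) versions <;>
    simp [Option.orElse]

-- ===== VERDICT (by name: the statement is the Claim_ definition above) =====
theorem find_original_folder_spec : Claim_equal_find_original_folder := by
  intro versions original_suffix _
  exact find_original_folder_eq versions original_suffix
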